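-- pv_equiv track=rewrite | github.com/floh0/advent-of-code-2022 | day23.py | ground
-- ===== SOURCE A (Python) =====
-- def ground(elves):
-- 	keys = iter(elves)
-- 	first = next(keys)
-- 	(minx, miny), (maxx, maxy) = first, first
-- 	for (x, y) in keys:
-- 		minx, miny, maxx, maxy = min(minx, x), min(miny, y), max(maxx, x), max(maxy, y)
-- 	area = (1+maxx-minx)*(1+maxy-miny)
-- 	return area - len(elves)
-- ===== SOURCE B (Python) =====
-- def ground(elves):
--     xs = sorted(x for x, _ in elves)
--     ys = sorted(y for _, y in elves)
--     return (1 + xs[-1] - xs[0]) * (1 + ys[-1] - ys[0]) - len(elves)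
-- ===== Notes on version B (the rewrite author's own statement) =====
-- stated objective: alternative
-- what changed: Replaces A's single fused extreme-tracking loop (four accumulators seeded from next()) by sorting each coordinate list and reading the extrema as the first and last elements of the sorted lists.
-- outside the precondition, e.g. on ground(set()): A raises StopIteration, B raises IndexError
import Mathlib
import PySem

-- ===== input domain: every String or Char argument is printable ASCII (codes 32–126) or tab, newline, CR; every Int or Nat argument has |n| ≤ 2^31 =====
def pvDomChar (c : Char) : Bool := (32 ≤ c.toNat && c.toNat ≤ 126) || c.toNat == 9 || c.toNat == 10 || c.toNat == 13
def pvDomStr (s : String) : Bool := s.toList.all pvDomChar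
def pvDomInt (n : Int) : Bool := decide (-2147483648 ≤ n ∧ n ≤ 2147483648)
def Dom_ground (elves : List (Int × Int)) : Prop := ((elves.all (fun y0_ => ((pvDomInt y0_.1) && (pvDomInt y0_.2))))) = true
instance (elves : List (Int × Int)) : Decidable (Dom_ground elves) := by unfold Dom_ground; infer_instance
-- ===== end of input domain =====

-- B finds the bounding-box extrema by sorting each coordinate list and reading its
-- first/last element, instead of A's single fused loop with four accumulators seeded
-- from the first element (objective: alternative).


-- ===== PORT A =====
-- next(keys) raises StopIteration on an empty list: the [] branch is unreachable under Pre_.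
def ground (elves : List (Int × Int)) : Int :=
  match elves with
  | [] => 0
  | first :: keys =>
    let st := keys.foldl
      (fun (s : Int × Int × Int × Int) (p : Int × Int) =>
        (min s.1 p.1, min s.2.1 p.2, max s.2.2.1 p.1, max s.2.2.2 p.2))
      (first.1, first.2, first.1, first.2)
    let area := (1 + st.2.2.1 - st.1) * (1 + st.2.2.2 - st.2.1)
    area - (elves.length : Int)

-- ===== PORT B =====
-- xs[-1]/xs[0] raise IndexError on the empty list in Python: the none branch is unreachable under Pre_.
def ground_alt (elves : List (Int × Int)) : Int :=
  let xs := PySem.List.sorted (elves.map (fun p => p.1)) (fun v => v) false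
  let ys := PySem.List.sorted (elves.map (fun p => p.2)) (fun v => v) false
  match PySem.List.pyGet? xs (-1), PySem.List.pyGet? xs 0,
        PySem.List.pyGet? ys (-1), PySem.List.pyGet? ys 0 with
  | some mxx, some mnx, some mxy, some mny =>
      (1 + mxx - mnx) * (1 + mxy - mny) - (elves.length : Int)
  | _, _, _, _ => 0

-- ===== PRECONDITION & SPEC =====
-- Pre_ excludes the empty list, on which A raises StopIteration (and B raises IndexError).
def Pre_ground (elves : List (Int × Int)) : Prop := elves ≠ []
instance (elves : List (Int × Int)) : Decidable (Pre_ground elves) := by unfold Pre_ground; infer_instance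
def pvWitness_ground : (List (Int × Int)) := [(0, 1), (2, -1)]

def Spec_ground (elves : List (Int × Int)) (out : Int) : Prop := out = ground_alt elves
instance (elves : List (Int × Int)) (out : Int) : Decidable (Spec_ground elves out) := by unfold Spec_ground; infer_instance

-- ===== CLAIM =====
def Claim_equal_ground : Prop := ∀ (elves : List (Int × Int)), Dom_ground elves → Pre_ground elves → Spec_ground elves (ground elves)

-- ===== LEMMAS AND PROOFS =====

-- foldl min is a member of the seed-plus-list and a lower bound for it.
theorem foldl_min_mem (l : List Int) (a : Int) : l.foldl min a ∈ a :: l := by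
  induction l generalizing a with
  | nil => simp
  | cons h t ih =>
    have hm := ih (min a h)
    simp only [List.foldl_cons]
    rcases List.mem_cons.1 hm with h1 | h1
    · rw [h1]
      rcases le_total a h with hle | hle
      · simp [min_eq_left hle]
      · simp [min_eq_right hle]
    · simp [h1]

theorem foldl_min_le (l : List Int) (a : Int) : ∀ y ∈ a :: l, l.foldl min a ≤ y := by
  induction l generalizing a with
  | nil => simp
  | cons h t ih =>
    intro y hy
    simp only [List.foldl_cons]
    rcases List.mem_cons.1 hy with h1 | h1
    · subst h1
      exact le_trans (ih (min y h) _ List.mem_cons_self) (min_le_left _ _)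
    · rcases List.mem_cons.1 h1 with h2 | h2
      · subst h2
        exact le_trans (ih (min a y) _ List.mem_cons_self) (min_le_right _ _)
      · exact ih (min a h) y (List.mem_cons_of_mem _ h2)

theorem foldl_max_mem (l : List Int) (a : Int) : l.foldl max a ∈ a :: l := by
  induction l generalizing a with
  | nil => simp
  | cons h t ih =>
    have hm := ih (max a h)
    simp only [List.foldl_cons]
    rcases List.mem_cons.1 hm with h1 | h1
    · rw [h1]
      rcases le_total a h with hle | hle
      · simp [max_eq_right hle]
      · simp [max_eq_left hle]
    · simp [h1]

theorem foldl_max_ge (l : List Int) (a : Int) : ∀ y ∈ a :: l, y ≤ l.foldl max a := by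
  induction l generalizing a with
  | nil => simp
  | cons h t ih =>
    intro y hy
    simp only [List.foldl_cons]
    rcases List.mem_cons.1 hy with h1 | h1
    · subst h1
      exact le_trans (le_max_left _ _) (ih (max y h) _ List.mem_cons_self)
    · rcases List.mem_cons.1 h1 with h2 | h2
      · subst h2
        exact le_trans (le_max_right _ _) (ih (max a y) _ List.mem_cons_self)
      · exact ih (max a h) y (List.mem_cons_of_mem _ h2)

-- The head of the ascending sort of a :: l is foldl min a l.
theorem sorted_head_eq_foldl_min (a : Int) (l : List Int) :
    (PySem.List.sorted (a :: l) (fun v => v) false)[0]? = some (l.foldl min a) := by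
  have hne : PySem.List.sorted (a :: l) (fun v => v) false ≠ [] := fun h =>
    (List.cons_ne_nil a l) ((PySem.List.sorted_eq_nil_iff _ _ _).1 h)
  rcases List.exists_cons_of_ne_nil hne with ⟨m, t, hmt⟩
  have hmem : m ∈ a :: l := (PySem.List.mem_sorted _ _ _ _).1 (hmt ▸ List.mem_cons_self)
  have h1 : m ≤ l.foldl min a :=
    PySem.List.key_head_sorted_le (a :: l) (fun v => v) hmt _ (foldl_min_mem l a)
  have h2 : l.foldl min a ≤ m := foldl_min_le l a m hmem
  rw [hmt]
  simp [le_antisymm h1 h2]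

-- The last element of the ascending sort of a :: l is foldl max a l.
theorem sorted_last_eq_foldl_max (a : Int) (l : List Int) :
    (PySem.List.sorted (a :: l) (fun v => v) false).getLast? = some (l.foldl max a) := by
  have hne : PySem.List.sorted (a :: l) (fun v => v) false ≠ [] := fun h =>
    (List.cons_ne_nil a l) ((PySem.List.sorted_eq_nil_iff _ _ _).1 h)
  have hlen : 0 < (PySem.List.sorted (a :: l) (fun v => v) false).length :=
    List.length_pos_iff.2 hne
  have hlast_mem : (PySem.List.sorted (a :: l) (fun v => v) false).getLast hne ∈ a :: l :=
    (PySem.List.mem_sorted _ _ _ _).1 (List.getLast_mem hne)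
  have hfold_mem : l.foldl max a ∈ PySem.List.sorted (a :: l) (fun v => v) false :=
    (PySem.List.mem_sorted _ _ _ _).2 (foldl_max_mem l a)
  rcases List.getElem_of_mem hfold_mem with ⟨i, hi, hgi⟩
  have hmono := PySem.List.sorted_id_getElem_mono (a :: l)
      (p := i) (q := (PySem.List.sorted (a :: l) (fun v => v) false).length - 1)
      (by omega) (by omega)
  have h1 : l.foldl max a ≤ (PySem.List.sorted (a :: l) (fun v => v) false).getLast hne := by
    rw [List.getLast_eq_getElem]
    rw [hgi] at hmono
    exact hmono
  have h2 := foldl_max_ge l a _ hlast_mem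
  rw [List.getLast?_eq_some_getLast (h := hne)]
  simp [le_antisymm h2 h1]

-- A's fused four-accumulator fold equals four independent folds over the coordinate lists.
theorem fold4_eq (t : List (Int × Int)) (a b c d : Int) :
    t.foldl
      (fun (s : Int × Int × Int × Int) (p : Int × Int) =>
        (min s.1 p.1, min s.2.1 p.2, max s.2.2.1 p.1, max s.2.2.2 p.2))
      (a, b, c, d)
    = ((t.map (fun p => p.1)).foldl min a,
       (t.map (fun p => p.2)).foldl min b,
       (t.map (fun p => p.1)).foldl max c,
       (t.map (fun p => p.2)).foldl max d) := by
  induction t generalizing a b c d with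
  | nil => rfl
  | cons h t ih => simp [List.foldl, ih]

theorem ground_spec : Claim_equal_ground := by
  intro elves _ hpre
  unfold Spec_ground
  match elves with
  | [] => exact absurd rfl hpre
  | (x0, y0) :: keys =>
    unfold ground ground_alt
    simp only [List.map_cons, PySem.List.pyGet?_neg_one, PySem.List.pyGet?_zero,
      sorted_last_eq_foldl_max, sorted_head_eq_foldl_min, fold4_eq]
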